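-- pv_equiv track=rewrite | github.com/CudaText-addons/cuda_csv_hilite | csv_proc.py | parse_csv_line_as_dict
-- ===== SOURCE A (Python) =====
-- def parse_csv_line_as_dict(s, sep=",", quote='"'):
--     """
--     Parses one CSV line
--     Gets fragments as dict of lists: kind: [offset_start, offset_end]
--     Gets {} for incorrect line
--     """
--     if not s:
--         return {}
--     # disable quote for TSV
--     if sep == "\t":
--         quote = chr(1)
--     res = {}
--     col, x0, b = 0, 0, True
--     for x1, c in enumerate(s):
--         if c == sep and b:
--             res[col] = [x0, x1]
--             x0 = x1 + 1
--             col += 1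
--             if x1 + 1 == len(s):
--                 res[col] = [x1 + 1, x1 + 1]
--         elif c == quote:
--             b = not b
--     if x0 != len(s):
--         res[col] = [x0, len(s)]
--     if not b:
--         return {}
--     else:
--         return res
--     return {}
-- ===== SOURCE B (Python) =====
-- def parse_csv_line_as_dict(s, sep=",", quote='"'):
--     """Two-pass: collect unquoted separator positions, then build columns from boundaries."""
--     if not s:
--         return {}
--     # disable quote for TSV
--     if sep == "\t":
--         quote = chr(1)
--     seps = []
--     b = True
--     for i, c in enumerate(s):
--         if c == sep and b:
--             seps.append(i)
--         elif c == quote: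
--             b = not b
--     if not b:
--         return {}
--     res = {}
--     start = 0
--     for col, p in enumerate(seps):
--         res[col] = [start, p]
--         start = p + 1
--     res[len(seps)] = [start, len(s)]
--     return res
-- ===== Notes on version B (the rewrite author's own statement) =====
-- stated objective: alternative
-- what changed: A builds the result dict incrementally while scanning, juggling col/x0/trailing-column bookkeeping inside the loop; B first collects only the unquoted separator positions in one scan, then derives every column's [start,end] from consecutive boundaries in a second pass, with one unconditional final column instead of A's two trailing-column cases.
import Mathlib
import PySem

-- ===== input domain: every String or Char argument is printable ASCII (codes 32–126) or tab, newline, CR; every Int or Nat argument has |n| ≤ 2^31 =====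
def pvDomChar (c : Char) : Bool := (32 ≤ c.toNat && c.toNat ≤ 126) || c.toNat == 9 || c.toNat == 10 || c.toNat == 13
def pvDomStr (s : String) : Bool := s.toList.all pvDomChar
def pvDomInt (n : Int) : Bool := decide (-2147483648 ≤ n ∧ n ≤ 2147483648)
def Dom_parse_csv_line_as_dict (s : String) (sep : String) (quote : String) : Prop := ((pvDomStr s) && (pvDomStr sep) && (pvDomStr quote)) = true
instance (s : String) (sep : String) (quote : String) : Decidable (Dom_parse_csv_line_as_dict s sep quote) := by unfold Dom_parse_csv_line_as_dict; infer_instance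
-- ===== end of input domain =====

-- B replaces A's in-loop dict/column bookkeeping by a separator-position scan plus a
-- boundary-to-column second pass (alternative decomposition, same cost).

-- ===== PORT A =====
-- loop body of A's single pass: state = (res, col, x0, b), item = (x1, c)
def pvA_step (sep quote : String) (n : Int)
    (st : PySem.Dict Int (List Int) × Int × Int × Bool) (xc : Int × Char) :
    PySem.Dict Int (List Int) × Int × Int × Bool :=
  if (String.ofList [xc.2] == sep) && st.2.2.2 then
    let res := st.1.insert st.2.1 [st.2.2.1, xc.1]
    let col := st.2.1 + 1
    let res := if xc.1 + 1 = n then res.insert col [xc.1 + 1, xc.1 + 1] else res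
    (res, col, xc.1 + 1, st.2.2.2)
  else if String.ofList [xc.2] == quote then (st.1, st.2.1, st.2.2.1, !st.2.2.2)
  else st

def parse_csv_line_as_dict (s : String) (sep : String) (quote : String) : List (Int × List Int) :=
  if s.toList = [] then [] else
  let quote := if sep == "\t" then String.ofList [Char.ofNat 1] else quote
  let n : Int := (s.toList.length : Int)
  let st := (PySem.List.enumerate s.toList 0).foldl (pvA_step sep quote n)
              (PySem.Dict.empty, 0, 0, true)
  let res := if st.2.2.1 ≠ n then st.1.insert st.2.1 [st.2.2.1, n] else st.1
  if !st.2.2.2 then [] else res.items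

-- ===== PORT B =====
-- B's first pass: collect unquoted separator positions; state = (seps, b)
def pvB_scan_step (sep quote : String) (st : List Int × Bool) (xc : Int × Char) :
    List Int × Bool :=
  if (String.ofList [xc.2] == sep) && st.2 then (st.1 ++ [xc.1], st.2)
  else if String.ofList [xc.2] == quote then (st.1, !st.2)
  else st

-- B's second pass: boundaries → columns; state = (res, start), item = (col, p)
def pvB_build_step (st : PySem.Dict Int (List Int) × Int) (cp : Int × Int) :
    PySem.Dict Int (List Int) × Int :=
  (st.1.insert cp.1 [st.2, cp.2], cp.2 + 1)

def parse_csv_line_as_dict_alt (s : String) (sep : String) (quote : String) : List (Int × List Int) :=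
  if s.toList = [] then [] else
  let quote := if sep == "\t" then String.ofList [Char.ofNat 1] else quote
  let n : Int := (s.toList.length : Int)
  let p := (PySem.List.enumerate s.toList 0).foldl (pvB_scan_step sep quote) ([], true)
  if !p.2 then [] else
  let q := (PySem.List.enumerate p.1 0).foldl pvB_build_step (PySem.Dict.empty, 0)
  (q.1.insert (p.1.length : Int) [q.2, n]).items

-- ===== PRECONDITION & SPEC =====
def Spec_parse_csv_line_as_dict (s : String) (sep : String) (quote : String) (out : List (Int × List Int)) : Prop := out = parse_csv_line_as_dict_alt s sep quote
instance (s : String) (sep : String) (quote : String) (out : List (Int × List Int)) : Decidable (Spec_parse_csv_line_as_dict s sep quote out) := by unfold Spec_parse_csv_line_as_dict; infer_instance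

-- ===== CLAIM (what is proved, stated in full; the proofs are below) =====
def Claim_equal_parse_csv_line_as_dict : Prop := ∀ (s : String) (sep : String) (quote : String), Dom_parse_csv_line_as_dict s sep quote → Spec_parse_csv_line_as_dict s sep quote (parse_csv_line_as_dict s sep quote)

-- ===== LEMMAS AND PROOFS =====

-- B's second pass as a function of the separator list
def pvBsec (seps : List Int) : PySem.Dict Int (List Int) × Int :=
  (PySem.List.enumerate seps 0).foldl pvB_build_step (PySem.Dict.empty, 0)

lemma pvBsec_append (seps : List Int) (p : Int) :
    pvBsec (seps ++ [p]) =
      ((pvBsec seps).1.insert (seps.length : Int) [(pvBsec seps).2, p], p + 1) := by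
  simp [pvBsec, PySem.List.enumerate_append, PySem.List.enumerate_cons,
        PySem.List.enumerate_nil, List.foldl_append, pvB_build_step]

lemma pv_main (sep quote : String) (n : Int) :
    ∀ (l : List Char) (i : Int) (seps : List Int) (b : Bool),
    i + (l.length : Int) = n →
    (pvBsec seps).2 ≤ i →
    (l = [] → (pvBsec seps).2 ≠ n) →
    (let st := (PySem.List.enumerate l i).foldl (pvA_step sep quote n)
                 ((pvBsec seps).1, (seps.length : Int), (pvBsec seps).2, b);
     let res := if st.2.2.1 ≠ n then st.1.insert st.2.1 [st.2.2.1, n] else st.1;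
     if !st.2.2.2 then ([] : List (Int × List Int)) else res.items)
    =
    (let p := (PySem.List.enumerate l i).foldl (pvB_scan_step sep quote) (seps, b);
     if !p.2 then [] else
     let q := pvBsec p.1;
     (q.1.insert ((p.1.length : Nat) : Int) [q.2, n]).items) := by
  intro l
  induction l with
  | nil =>
    intro i seps b hlen hx0 hend
    simp only [PySem.List.enumerate_nil, List.foldl_nil]
    have hne : (pvBsec seps).2 ≠ n := hend rfl
    simp [hne]
  | cons c rest ih =>
    intro i seps b hlen hx0 hend
    simp only [PySem.List.enumerate_cons, List.foldl_cons]
    by_cases hs : ((String.ofList [c] == sep) && b) = true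
    · -- separator branch
      have hb : b = true := by cases b <;> simp_all
      rcases List.eq_nil_or_concat' rest with hrest | hconcat
      · -- last character: trailing empty column inserted inside the loop
        subst hrest
        have hn : i + 1 = n := by simpa using hlen
        simp only [pvA_step, pvB_scan_step, hs, hn,
                   PySem.List.enumerate_nil, List.foldl_nil, if_true]
        have h2 := pvBsec_append seps i
        simp [h2, hb, hn]
      · -- separator with more input to come: recurse with seps ++ [i]
        have hrestne : rest ≠ [] := by rcases hconcat with ⟨ys, y, rfl⟩; simp
        have hlt : i + 1 ≠ n := by
          have hpos : (0:Int) < rest.length := by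
            exact_mod_cast List.length_pos_iff.mpr hrestne
          simp only [List.length_cons] at hlen
          push_cast at hlen
          omega
        have h2 := pvBsec_append seps i
        have hih := ih (i + 1) (seps ++ [i]) b
          (by simp only [List.length_cons] at hlen; push_cast at hlen ⊢; omega)
          (by rw [h2]) (fun h => absurd h hrestne)
        simp only [h2] at hih
        have hcast : (((seps ++ [i]).length : Int)) = (seps.length : Int) + 1 := by
          simp
        rw [hcast] at hih
        simpa [pvA_step, pvB_scan_step, hs, hlt] using hih
    · -- not an (unquoted) separator
      have hx0' : (pvBsec seps).2 ≤ i + 1 := by omega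
      have hend' : rest = [] → (pvBsec seps).2 ≠ n := by
        intro h; subst h
        simp only [List.length_cons] at hlen; push_cast at hlen; omega
      have hlen' : (i + 1) + (rest.length : Int) = n := by
        simp only [List.length_cons] at hlen; push_cast at hlen ⊢; omega
      by_cases hq : (String.ofList [c] == quote) = true
      · have := ih (i + 1) seps (!b) hlen' hx0' hend'
        simpa [pvA_step, pvB_scan_step, hs, hq] using this
      · have := ih (i + 1) seps b hlen' hx0' hend'
        simpa [pvA_step, pvB_scan_step, hs, hq] using this

-- ===== VERDICT (by name: the statement is the Claim_ definition above) =====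
theorem parse_csv_line_as_dict_spec : Claim_equal_parse_csv_line_as_dict := by
  intro s sep quote _
  unfold Spec_parse_csv_line_as_dict parse_csv_line_as_dict parse_csv_line_as_dict_alt
  by_cases h : s.toList = []
  · simp [h]
  · simp only [if_neg h]
    have hm := pv_main sep (if sep == "\t" then String.ofList [Char.ofNat 1] else quote)
      ((s.toList.length : Int)) s.toList 0 [] true (by simp) (by simp [pvBsec])
      (fun hh => absurd hh h)
    simpa [pvBsec, PySem.List.enumerate_nil] using hm
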